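-- pv_equiv track=rewrite | github.com/MinQDU014/apple_core_breaker | core/solver.py | find_valid_rectangles
-- ===== SOURCE A (Python) =====
-- def find_valid_rectangles(board):
--     h, w = len(board), len(board[0])
--     best = None
--     for r1 in range(h):
--         for r2 in range(r1+1, h+1):
--             for c1 in range(w):
--                 for c2 in range(c1+1, w+1):
--                     flat = [board[r][c] for r in range(r1, r2) for c in range(c1, c2)]
--                     if 0 in flat or sum(flat) != 10:
--                         continue
--                     area = (r2 - r1) * (c2 - c1)
--                     if best is None or area < best[1]:
--                         best = ((r1, c1, r2, c2), area)
--     return best[0] if best else None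
-- ===== SOURCE B (Python) =====
-- def find_valid_rectangles(board):
--     h, w = len(board), len(board[0])
--     # 2D prefix tables: P[r][c] = sum of board[i][j], Z[r][c] = number of zeros, for i<r, j<c
--     P = [[sum(board[i][j] for i in range(r) for j in range(c))
--           for c in range(w + 1)] for r in range(h + 1)]
--     Z = [[sum((1 if board[i][j] == 0 else 0) for i in range(r) for j in range(c))
--           for c in range(w + 1)] for r in range(h + 1)]
--     cands = [((r1, c1, r2, c2), (r2 - r1) * (c2 - c1))
--              for r1 in range(h) for r2 in range(r1 + 1, h + 1)
--              for c1 in range(w) for c2 in range(c1 + 1, w + 1)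
--              if Z[r2][c2] - Z[r1][c2] - Z[r2][c1] + Z[r1][c1] == 0
--              and P[r2][c2] - P[r1][c2] - P[r2][c1] + P[r1][c1] == 10]
--     if not cands:
--         return None
--     return min(cands, key=lambda t: t[1])[0]
-- ===== Notes on version B (the rewrite author's own statement) =====
-- stated objective: faster
-- what changed: B precomputes 2D prefix-sum and prefix-zero-count tables so each rectangle is tested in O(1) by four table lookups (no per-rectangle rescan), collects the valid rectangles in a comprehension and returns min(cands, key=area) instead of A's accumulator loop over flat cell lists.
import Mathlib
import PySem

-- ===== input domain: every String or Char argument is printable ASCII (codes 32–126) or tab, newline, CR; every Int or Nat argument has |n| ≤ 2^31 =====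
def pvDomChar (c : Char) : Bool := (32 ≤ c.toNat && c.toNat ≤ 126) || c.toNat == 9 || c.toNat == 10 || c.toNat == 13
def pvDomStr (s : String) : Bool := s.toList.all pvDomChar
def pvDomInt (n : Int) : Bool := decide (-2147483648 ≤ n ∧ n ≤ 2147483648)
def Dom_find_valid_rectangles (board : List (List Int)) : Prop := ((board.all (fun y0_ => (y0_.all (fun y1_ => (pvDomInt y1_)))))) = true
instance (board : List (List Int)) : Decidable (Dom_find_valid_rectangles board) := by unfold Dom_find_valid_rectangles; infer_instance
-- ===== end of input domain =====

-- B replaces A's per-rectangle flat scan with precomputed 2D prefix-sum / zero-count tables (O(1) per rectangle test); faster.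

-- board[i][j] (indices always in range under Pre_)
def pvCell (board : List (List Int)) (i j : Int) : Int :=
  PySem.List.pyGetD (PySem.List.pyGetD board i []) j 0

-- the shared best-update step ('if best is None or area < best[1]')
def pvUpd (best : Option ((Int × Int × Int × Int) × Int)) (r1 c1 r2 c2 : Int) :
    Option ((Int × Int × Int × Int) × Int) :=
  let area := (r2 - r1) * (c2 - c1)
  match best with
  | none => some ((r1, c1, r2, c2), area)
  | some b => if area < b.2 then some ((r1, c1, r2, c2), area) else some b

-- ===== PORT A =====
def find_valid_rectangles (board : List (List Int)) : Option (Int × Int × Int × Int) :=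
  let h : Int := board.length
  let w : Int := (PySem.List.pyGetD board 0 []).length
  let best : Option ((Int × Int × Int × Int) × Int) :=
    (PySem.List.pyRange 0 h 1).foldl (fun best r1 =>
      (PySem.List.pyRange (r1 + 1) (h + 1) 1).foldl (fun best r2 =>
        (PySem.List.pyRange 0 w 1).foldl (fun best c1 =>
          (PySem.List.pyRange (c1 + 1) (w + 1) 1).foldl (fun best c2 =>
            let flat := (PySem.List.pyRange r1 r2 1).flatMap (fun r =>
              (PySem.List.pyRange c1 c2 1).map (fun c => pvCell board r c))
            if 0 ∈ flat ∨ flat.sum ≠ 10 then best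
            else pvUpd best r1 c1 r2 c2) best) best) best) none
  best.map (fun b => b.1)

-- ===== PORT B =====
def find_valid_rectangles_alt (board : List (List Int)) : Option (Int × Int × Int × Int) :=
  let h : Int := board.length
  let w : Int := (PySem.List.pyGetD board 0 []).length
  -- P[r][c] = sum of board[i][j] for i<r, j<c ; Z[r][c] = number of zeros there
  let P : List (List Int) := (PySem.List.pyRange 0 (h + 1) 1).map (fun r =>
    (PySem.List.pyRange 0 (w + 1) 1).map (fun c =>
      ((PySem.List.pyRange 0 r 1).flatMap (fun i =>
        (PySem.List.pyRange 0 c 1).map (fun j => pvCell board i j))).sum))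
  let Z : List (List Int) := (PySem.List.pyRange 0 (h + 1) 1).map (fun r =>
    (PySem.List.pyRange 0 (w + 1) 1).map (fun c =>
      ((PySem.List.pyRange 0 r 1).flatMap (fun i =>
        (PySem.List.pyRange 0 c 1).map (fun j =>
          if pvCell board i j = 0 then (1 : Int) else 0))).sum))
  let tbl : List (List Int) → Int → Int → Int := fun t r c =>
    PySem.List.pyGetD (PySem.List.pyGetD t r []) c 0
  let cands : List ((Int × Int × Int × Int) × Int) :=
    (PySem.List.pyRange 0 h 1).flatMap (fun r1 =>
      (PySem.List.pyRange (r1 + 1) (h + 1) 1).flatMap (fun r2 =>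
        (PySem.List.pyRange 0 w 1).flatMap (fun c1 =>
          (PySem.List.pyRange (c1 + 1) (w + 1) 1).flatMap (fun c2 =>
            if tbl Z r2 c2 - tbl Z r1 c2 - tbl Z r2 c1 + tbl Z r1 c1 = 0 ∧
                tbl P r2 c2 - tbl P r1 c2 - tbl P r2 c1 + tbl P r1 c1 = 10 then
              [((r1, c1, r2, c2), (r2 - r1) * (c2 - c1))]
            else []))))
  if cands = [] then none
  else (PySem.List.min? cands (fun t => t.2)).map (fun t => t.1)

-- ===== PRECONDITION & SPEC =====
-- Pre_ excludes exactly the inputs on which the Python A raises IndexError: the empty board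
-- (board[0]) and ragged boards whose later rows are shorter than row 0.
def Pre_find_valid_rectangles (board : List (List Int)) : Prop :=
  board ≠ [] ∧ ∀ row ∈ board, (PySem.List.pyGetD board 0 []).length ≤ row.length
instance (board : List (List Int)) : Decidable (Pre_find_valid_rectangles board) := by
  unfold Pre_find_valid_rectangles; infer_instance
def pvWitness_find_valid_rectangles : List (List Int) := [[10]]

def Spec_find_valid_rectangles (board : List (List Int)) (out : Option (Int × Int × Int × Int)) : Prop := out = find_valid_rectangles_alt board
instance (board : List (List Int)) (out : Option (Int × Int × Int × Int)) : Decidable (Spec_find_valid_rectangles board out) := by unfold Spec_find_valid_rectangles; infer_instance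

-- ===== CLAIM (what is proved, stated in full; the proofs are below) =====
def Claim_equal_find_valid_rectangles : Prop := ∀ (board : List (List Int)), Dom_find_valid_rectangles board → Pre_find_valid_rectangles board → Spec_find_valid_rectangles board (find_valid_rectangles board)

-- ===== LEMMAS AND PROOFS =====

-- sum of v over the rectangle [r1,r2) x [c1,c2)
def pvRect (v : Int → Int → Int) (r1 r2 c1 c2 : Int) : Int :=
  ((PySem.List.pyRange r1 r2 1).flatMap (fun i =>
    (PySem.List.pyRange c1 c2 1).map (fun j => v i j))).sum

theorem pv_sum_flatMap_append {α : Type} (l : List α) (f g : α → List Int) :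
    (l.flatMap (fun i => f i ++ g i)).sum = (l.flatMap f).sum + (l.flatMap g).sum := by
  induction l with
  | nil => simp
  | cons x xs ih => simp [List.flatMap_cons, ih]; ring

theorem pvRect_row_split (v : Int → Int → Int) {a m b : Int} (c1 c2 : Int)
    (h1 : a ≤ m) (h2 : m ≤ b) :
    pvRect v a b c1 c2 = pvRect v a m c1 c2 + pvRect v m b c1 c2 := by
  unfold pvRect
  rw [PySem.List.pyRange_one_append a m b h1 h2, List.flatMap_append, List.sum_append]

theorem pvRect_col_split (v : Int → Int → Int) (r1 r2 : Int) {a m b : Int}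
    (h1 : a ≤ m) (h2 : m ≤ b) :
    pvRect v r1 r2 a b = pvRect v r1 r2 a m + pvRect v r1 r2 m b := by
  unfold pvRect
  have hfun : (fun i => List.map (fun j => v i j) (PySem.List.pyRange a b 1))
      = fun i => List.map (fun j => v i j) (PySem.List.pyRange a m 1)
        ++ List.map (fun j => v i j) (PySem.List.pyRange m b 1) := by
    funext i
    rw [PySem.List.pyRange_one_append a m b h1 h2, List.map_append]
  rw [hfun, pv_sum_flatMap_append]

theorem pvRect_four (v : Int → Int → Int) {r1 r2 c1 c2 : Int}
    (hr0 : 0 ≤ r1) (hr : r1 ≤ r2) (hc0 : 0 ≤ c1) (hc : c1 ≤ c2) :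
    pvRect v 0 r2 0 c2 - pvRect v 0 r1 0 c2 - pvRect v 0 r2 0 c1 + pvRect v 0 r1 0 c1
      = pvRect v r1 r2 c1 c2 := by
  rw [pvRect_row_split v (a := 0) (m := r1) (b := r2) 0 c2 hr0 hr,
      pvRect_row_split v (a := 0) (m := r1) (b := r2) 0 c1 hr0 hr,
      pvRect_col_split v r1 r2 (a := 0) (m := c1) (b := c2) hc0 hc]
  ring

-- table lookup: the [r][c] entry of the comprehension-built table is f r c
theorem pvTbl_lookup (f : Int → Int → Int) {h w : Int} (r c : Int)
    (hr0 : 0 ≤ r) (hr : r ≤ h) (hc0 : 0 ≤ c) (hc : c ≤ w) :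
    PySem.List.pyGetD
      (PySem.List.pyGetD ((PySem.List.pyRange 0 (h + 1) 1).map (fun r =>
        (PySem.List.pyRange 0 (w + 1) 1).map (fun c => f r c))) r []) c 0 = f r c := by
  rw [PySem.List.pyGetD_map_pyRange_of_nonneg _ _ _ _ hr0 (by omega)]
  rw [PySem.List.pyGetD_map_pyRange_of_nonneg _ _ _ _ hc0 (by omega)]

theorem pv_count_nonneg (l : List Int) :
    0 ≤ (l.map (fun x => if x = 0 then (1 : Int) else 0)).sum := by
  induction l with
  | nil => simp
  | cons x xs ih => simp only [List.map_cons, List.sum_cons]; split <;> omega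

theorem pv_count_ne_zero_iff (l : List Int) :
    (l.map (fun x => if x = 0 then (1 : Int) else 0)).sum ≠ 0 ↔ (0 : Int) ∈ l := by
  induction l with
  | nil => simp
  | cons x xs ih =>
    have h := pv_count_nonneg xs
    simp only [List.map_cons, List.sum_cons, List.mem_cons]
    by_cases hx : x = 0
    · simp [hx]; omega
    · simp [hx, Ne.symm hx, ih]

-- the zero-count of a rectangle is nonzero iff 0 occurs among its cells
theorem pvZ_iff (board : List (List Int)) (r1 r2 c1 c2 : Int) :
    pvRect (fun i j => if pvCell board i j = 0 then (1 : Int) else 0) r1 r2 c1 c2 ≠ 0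
      ↔ 0 ∈ (PySem.List.pyRange r1 r2 1).flatMap (fun r =>
          (PySem.List.pyRange c1 c2 1).map (fun c => pvCell board r c)) := by
  rw [← pv_count_ne_zero_iff]
  unfold pvRect
  rw [List.map_flatMap]
  simp only [List.map_map, Function.comp_def]

-- A's sum over the flat cell list IS pvRect of pvCell
theorem pv_flat_sum (board : List (List Int)) (r1 r2 c1 c2 : Int) :
    ((PySem.List.pyRange r1 r2 1).flatMap (fun r =>
      (PySem.List.pyRange c1 c2 1).map (fun c => pvCell board r c))).sum
      = pvRect (fun i j => pvCell board i j) r1 r2 c1 c2 := rfl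

-- the candidate-or-not singleton produced for one rectangle is the same in A's test and B's test
theorem pv_cand_eq (board : List (List Int)) (r1 r2 c1 c2 : Int)
    (hr0 : 0 ≤ r1) (hr12 : r1 < r2) (hr2 : r2 ≤ (board.length : Int))
    (hc0 : 0 ≤ c1) (hc12 : c1 < c2) (hc2 : c2 ≤ ((PySem.List.pyGetD board 0 []).length : Int)) :
    (let flat := (PySem.List.pyRange r1 r2 1).flatMap (fun r =>
        (PySem.List.pyRange c1 c2 1).map (fun c => pvCell board r c))
     if 0 ∈ flat ∨ flat.sum ≠ 10 then ([] : List ((Int × Int × Int × Int) × Int))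
     else [((r1, c1, r2, c2), (r2 - r1) * (c2 - c1))])
    =
    (let h : Int := board.length
     let w : Int := (PySem.List.pyGetD board 0 []).length
     let P : List (List Int) := (PySem.List.pyRange 0 (h + 1) 1).map (fun r =>
       (PySem.List.pyRange 0 (w + 1) 1).map (fun c =>
         pvRect (fun i j => pvCell board i j) 0 r 0 c))
     let Z : List (List Int) := (PySem.List.pyRange 0 (h + 1) 1).map (fun r =>
       (PySem.List.pyRange 0 (w + 1) 1).map (fun c =>
         pvRect (fun i j => if pvCell board i j = 0 then (1 : Int) else 0) 0 r 0 c))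
     let tbl : List (List Int) → Int → Int → Int := fun t r c =>
       PySem.List.pyGetD (PySem.List.pyGetD t r []) c 0
     if tbl Z r2 c2 - tbl Z r1 c2 - tbl Z r2 c1 + tbl Z r1 c1 = 0 ∧
         tbl P r2 c2 - tbl P r1 c2 - tbl P r2 c1 + tbl P r1 c1 = 10 then
       [((r1, c1, r2, c2), (r2 - r1) * (c2 - c1))]
     else []) := by
  dsimp only
  simp only [pvTbl_lookup (h := (board.length : Int)) (w := ((PySem.List.pyGetD board 0 []).length : Int)) (fun r c => pvRect (fun i j => pvCell board i j) 0 r 0 c) r2 c2 (by omega) hr2 (by omega) hc2,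
      pvTbl_lookup (h := (board.length : Int)) (w := ((PySem.List.pyGetD board 0 []).length : Int)) (fun r c => pvRect (fun i j => pvCell board i j) 0 r 0 c) r1 c2 hr0 (by omega) (by omega) hc2,
      pvTbl_lookup (h := (board.length : Int)) (w := ((PySem.List.pyGetD board 0 []).length : Int)) (fun r c => pvRect (fun i j => pvCell board i j) 0 r 0 c) r2 c1 (by omega) hr2 hc0 (by omega),
      pvTbl_lookup (h := (board.length : Int)) (w := ((PySem.List.pyGetD board 0 []).length : Int)) (fun r c => pvRect (fun i j => pvCell board i j) 0 r 0 c) r1 c1 hr0 (by omega) hc0 (by omega),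
      pvTbl_lookup (h := (board.length : Int)) (w := ((PySem.List.pyGetD board 0 []).length : Int)) (fun r c => pvRect (fun i j => if pvCell board i j = 0 then (1 : Int) else 0) 0 r 0 c) r2 c2 (by omega) hr2 (by omega) hc2,
      pvTbl_lookup (h := (board.length : Int)) (w := ((PySem.List.pyGetD board 0 []).length : Int)) (fun r c => pvRect (fun i j => if pvCell board i j = 0 then (1 : Int) else 0) 0 r 0 c) r1 c2 hr0 (by omega) (by omega) hc2,
      pvTbl_lookup (h := (board.length : Int)) (w := ((PySem.List.pyGetD board 0 []).length : Int)) (fun r c => pvRect (fun i j => if pvCell board i j = 0 then (1 : Int) else 0) 0 r 0 c) r2 c1 (by omega) hr2 hc0 (by omega),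
      pvTbl_lookup (h := (board.length : Int)) (w := ((PySem.List.pyGetD board 0 []).length : Int)) (fun r c => pvRect (fun i j => if pvCell board i j = 0 then (1 : Int) else 0) 0 r 0 c) r1 c1 hr0 (by omega) hc0 (by omega)]
  simp only [pvRect_four _ hr0 (le_of_lt hr12) hc0 (le_of_lt hc12)]
  by_cases h0 : 0 ∈ (PySem.List.pyRange r1 r2 1).flatMap (fun r =>
      (PySem.List.pyRange c1 c2 1).map (fun c => pvCell board r c))
  · rw [if_pos (Or.inl h0),
      if_neg (fun hz => ((pvZ_iff board r1 r2 c1 c2).mpr h0) hz.1)]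
  · have hz : pvRect (fun i j => if pvCell board i j = 0 then (1 : Int) else 0) r1 r2 c1 c2 = 0 := by
      by_contra hne
      exact h0 ((pvZ_iff board r1 r2 c1 c2).mp hne)
    by_cases hs : ((PySem.List.pyRange r1 r2 1).flatMap (fun r =>
        (PySem.List.pyRange c1 c2 1).map (fun c => pvCell board r c))).sum = 10
    · rw [if_neg (by push Not; exact ⟨h0, hs⟩),
        if_pos ⟨hz, by rw [← pv_flat_sum]; exact hs⟩]
    · rw [if_pos (Or.inr hs), if_neg (fun hp => hs (by rw [pv_flat_sum]; exact hp.2))]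

-- A's skip-or-update body is a fold of the min-step over the rectangle's candidate list
theorem pv_body_eq (cond : Prop) [Decidable cond]
    (best : Option ((Int × Int × Int × Int) × Int)) (r1 c1 r2 c2 : Int) :
    (if cond then best else pvUpd best r1 c1 r2 c2)
      = (if cond then ([] : List ((Int × Int × Int × Int) × Int))
          else [((r1, c1, r2, c2), (r2 - r1) * (c2 - c1))]).foldl
          (fun acc x => match acc with
            | none => some x
            | some m => if x.2 < m.2 then some x else some m) best := by
  split
  · rfl
  · cases best <;> rfl

-- the accumulator fold over any candidate list IS Python min(…, key=lambda t: t[1]) (guarded by the emptiness test)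
theorem pv_fold_min {L1 L2 : List ((Int × Int × Int × Int) × Int)} (h : L1 = L2) :
    (L1.foldl (fun acc x => match acc with
        | none => some x
        | some m => if x.2 < m.2 then some x else some m) none).map (fun t => t.1)
      = if L2 = [] then none
        else (PySem.List.min? L2 (fun t => t.2)).map (fun t => t.1) := by
  subst h
  by_cases hL : L1 = []
  · simp [hL]
  · rw [if_neg hL]
    congr 1
    unfold PySem.List.min?
    apply PySem.List.foldl_congr_mem'
    intro x _ acc
    cases acc with
    | none => rfl
    | some m => by_cases h : x.2 < m.2 <;> simp [h]

-- ===== VERDICT (by name: the statement is the Claim_ definition above) =====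
theorem find_valid_rectangles_spec : Claim_equal_find_valid_rectangles := by
  intro board _ _
  unfold Spec_find_valid_rectangles find_valid_rectangles find_valid_rectangles_alt
  dsimp only
  simp only [pv_body_eq, ← List.foldl_flatMap]
  apply pv_fold_min
  apply List.flatMap_congr
  intro r1 hr1
  apply List.flatMap_congr
  intro r2 hr2
  apply List.flatMap_congr
  intro c1 hc1
  apply List.flatMap_congr
  intro c2 hc2
  rw [PySem.List.mem_pyRange_one] at hr1 hr2 hc1 hc2
  exact pv_cand_eq board r1 r2 c1 c2 hr1.1 (by omega) (by omega)
    hc1.1 (by omega) (by omega)
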